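-- pv_equiv track=rewrite | github.com/suer-tech/bgn_agent | sandbox-py/agent.py | update_plan_md_step
-- ===== SOURCE A (Python) =====
-- def update_plan_md_step(
--     content: str, step_id: str, status: str, notes: str = ""
-- ) -> str:
--     """Update a specific step's status in plan.md content."""
--     lines = content.split("\n")
--     new_lines = []
--     in_target_step = False
--
--     for line in lines:
--         if line.strip().startswith(f"### {step_id}"):
--             in_target_step = True
--             new_lines.append(line)
--         elif in_target_step and line.strip().startswith("- **Status:**"):
--             new_lines.append(f"- **Status:** {status}")
--             in_target_step = False
--         else:
--             new_lines.append(line)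
--             if in_target_step and line.strip().startswith("### "):
--                 in_target_step = False
--
--     result = "\n".join(new_lines)
--     if notes:
--         result += f"\n\n> **Note ({step_id}):** {notes}"
--     return result
-- ===== SOURCE B (Python) =====
-- def _split_sections(lines):
--     """Group lines into a preamble plus sections, each starting at a '### ' header."""
--     sections = []
--     cur = []
--     for line in lines:
--         if line.strip().startswith("### "):
--             sections.append(cur)
--             cur = [line]
--         else:
--             cur.append(line)
--     sections.append(cur)
--     return sections
--
--
-- def _fix_section(sec, head, status):
--     """If sec is a section for `head`, replace its first status line."""
--     if sec and sec[0].strip().startswith(head):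
--         out = []
--         replaced = False
--         for line in sec:
--             if not replaced and line.strip().startswith("- **Status:**"):
--                 out.append("- **Status:** " + status)
--                 replaced = True
--             else:
--                 out.append(line)
--         return out
--     return sec
--
--
-- def update_plan_md_step(
--     content: str, step_id: str, status: str, notes: str = ""
-- ) -> str:
--     """Update a specific step's status in plan.md content."""
--     head = "### " + step_id
--     out = []
--     for sec in _split_sections(content.split("\n")):
--         out.extend(_fix_section(sec, head, status))
--     result = "\n".join(out)
--     if notes:
--         result += f"\n\n> **Note ({step_id}):** {notes}"
--     return result
-- ===== Notes on version B (the rewrite author's own statement) =====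
-- stated objective: alternative
-- what changed: B first groups the lines into header-delimited sections (preamble + one group per '### ' header) and then fixes the first status line of each matching section locally, instead of A's single scan threading an in_target_step flag across all lines.
import Mathlib
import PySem

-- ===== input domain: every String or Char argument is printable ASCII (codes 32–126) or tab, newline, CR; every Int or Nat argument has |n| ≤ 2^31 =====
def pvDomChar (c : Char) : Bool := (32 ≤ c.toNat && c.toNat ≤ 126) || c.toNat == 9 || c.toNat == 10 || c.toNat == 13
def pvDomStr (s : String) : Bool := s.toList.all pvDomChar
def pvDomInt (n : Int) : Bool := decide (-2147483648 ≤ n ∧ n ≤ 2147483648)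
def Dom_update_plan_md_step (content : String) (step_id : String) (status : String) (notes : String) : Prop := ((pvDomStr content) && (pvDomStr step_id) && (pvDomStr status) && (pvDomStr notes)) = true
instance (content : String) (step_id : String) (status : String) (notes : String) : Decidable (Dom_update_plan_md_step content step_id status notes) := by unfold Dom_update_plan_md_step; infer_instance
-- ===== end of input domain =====

-- B regroups the lines into '### '-header-delimited sections and fixes each matching
-- section locally, instead of A's single flag-threading scan; same behaviour, same cost.

-- the three line tests both Python versions write inline, named once
def pvIsHdr (l : String) : Bool := PySem.Str.startswith (PySem.Str.strip l) "### "
def pvIsMatch (step_id l : String) : Bool := PySem.Str.startswith (PySem.Str.strip l) ("### " ++ step_id)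
def pvIsSt (l : String) : Bool := PySem.Str.startswith (PySem.Str.strip l) "- **Status:**"

-- ===== PORT A =====
-- one iteration of A's for-loop: state = (new_lines, in_target_step)
def pvStepA (step_id status : String) (st : List String × Bool) (line : String) : List String × Bool :=
  if pvIsMatch step_id line then
    (st.1 ++ [line], true)
  else if st.2 && pvIsSt line then
    (st.1 ++ ["- **Status:** " ++ status], false)
  else
    (st.1 ++ [line], if st.2 && pvIsHdr line then false else st.2)

def update_plan_md_step (content : String) (step_id : String) (status : String) (notes : String) : String :=
  let lines := (PySem.Str.split? content "\n").getD []   -- sep "\n" ≠ "": split? is always `some` here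
  let st := lines.foldl (pvStepA step_id status) ([], false)
  let result := PySem.Str.join "\n" st.1
  if notes = "" then result
  else result ++ "\n\n> **Note (" ++ step_id ++ "):** " ++ notes

-- ===== PORT B =====
-- _split_sections' loop: state = (sections, cur)
def pvStepG (st : List (List String) × List String) (line : String) : List (List String) × List String :=
  if pvIsHdr line then (st.1 ++ [st.2], [line])
  else (st.1, st.2 ++ [line])

def pvSplitSections (lines : List String) : List (List String) :=
  let st := lines.foldl pvStepG ([], [])
  st.1 ++ [st.2]

-- _fix_section's inner loop: state = (out, replaced)
def pvStepR (status : String) (st : List String × Bool) (line : String) : List String × Bool :=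
  if !st.2 && pvIsSt line then
    (st.1 ++ ["- **Status:** " ++ status], true)
  else (st.1 ++ [line], st.2)

def pvFixSection (head status : String) (sec : List String) : List String :=
  if (match sec with
      | [] => false
      | l :: _ => PySem.Str.startswith (PySem.Str.strip l) head) then
    (sec.foldl (pvStepR status) ([], false)).1
  else sec

def update_plan_md_step_alt (content : String) (step_id : String) (status : String) (notes : String) : String :=
  let out := (pvSplitSections ((PySem.Str.split? content "\n").getD [])).foldl
    (fun acc sec => acc ++ pvFixSection ("### " ++ step_id) status sec) []
  let result := PySem.Str.join "\n" out
  if notes = "" then result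
  else result ++ "\n\n> **Note (" ++ step_id ++ "):** " ++ notes

-- ===== PRECONDITION & SPEC =====
def Spec_update_plan_md_step (content : String) (step_id : String) (status : String) (notes : String) (out : String) : Prop := out = update_plan_md_step_alt content step_id status notes
instance (content : String) (step_id : String) (status : String) (notes : String) (out : String) : Decidable (Spec_update_plan_md_step content step_id status notes out) := by unfold Spec_update_plan_md_step; infer_instance

-- ===== CLAIM (what is proved, stated in full; the proofs are below) =====
def Claim_equal_update_plan_md_step : Prop := ∀ (content : String) (step_id : String) (status : String) (notes : String), Dom_update_plan_md_step content step_id status notes → Spec_update_plan_md_step content step_id status notes (update_plan_md_step content step_id status notes)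

-- ===== LEMMAS AND PROOFS =====

-- recursive characterisation of A's scan
def pvRunA (sid status : String) : List String → Bool → List String
  | [], _ => []
  | l :: ls, b =>
    if pvIsMatch sid l then l :: pvRunA sid status ls true
    else if b && pvIsSt l then ("- **Status:** " ++ status) :: pvRunA sid status ls false
    else l :: pvRunA sid status ls (if b && pvIsHdr l then false else b)

-- recursive characterisation of B's grouping
def pvGroups : List String → List String → List (List String)
  | [], cur => [cur]
  | l :: ls, cur => if pvIsHdr l then cur :: pvGroups ls [l] else pvGroups ls (cur ++ [l])

-- recursive characterisation of B's replacement loop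
def pvRepl (status : String) : List String → Bool → List String
  | [], _ => []
  | l :: ls, r =>
    if !r && pvIsSt l then ("- **Status:** " ++ status) :: pvRepl status ls true
    else l :: pvRepl status ls r

def pvSecMatch (sid : String) (sec : List String) : Bool :=
  match sec with
  | [] => false
  | l :: _ => pvIsMatch sid l

def pvProc (sid status : String) (sec : List String) : List String :=
  if pvSecMatch sid sec then pvRepl status sec false else sec

lemma pvFoldA_eq (sid status : String) (ls : List String) (acc : List String) (b : Bool) :
    (ls.foldl (pvStepA sid status) (acc, b)).1 = acc ++ pvRunA sid status ls b := by
  induction ls generalizing acc b with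
  | nil => simp only [List.foldl_nil, pvRunA, List.append_nil]
  | cons l ls ih =>
    simp only [List.foldl_cons, pvStepA, pvRunA]
    cases h1 : pvIsMatch sid l
    · cases h2 : b && pvIsSt l <;>
        simp only [Bool.false_eq_true, eq_self_iff_true, if_false, if_true, ih, List.append_assoc, List.singleton_append]
    · simp only [Bool.false_eq_true, eq_self_iff_true, if_false, if_true, ih, List.append_assoc, List.singleton_append]

lemma pvFoldG_eq (ls : List String) (secs : List (List String)) (cur : List String) :
    (ls.foldl pvStepG (secs, cur)).1 ++ [(ls.foldl pvStepG (secs, cur)).2]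
      = secs ++ pvGroups ls cur := by
  induction ls generalizing secs cur with
  | nil => simp only [List.foldl_nil, pvGroups]
  | cons l ls ih =>
    simp only [List.foldl_cons, pvStepG, pvGroups]
    cases h : pvIsHdr l <;>
      simp only [Bool.false_eq_true, eq_self_iff_true, if_false, if_true, ih, List.append_assoc, List.singleton_append]

lemma pvFoldR_eq (status : String) (sec : List String) (acc : List String) (r : Bool) :
    (sec.foldl (pvStepR status) (acc, r)).1 = acc ++ pvRepl status sec r := by
  induction sec generalizing acc r with
  | nil => simp only [List.foldl_nil, pvRepl, List.append_nil]
  | cons l ls ih =>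
    simp only [List.foldl_cons, pvStepR, pvRepl]
    cases h : !r && pvIsSt l <;>
      simp only [Bool.false_eq_true, eq_self_iff_true, if_false, if_true, ih, List.append_assoc, List.singleton_append]

lemma pvFix_eq_proc (sid status : String) (sec : List String) :
    pvFixSection ("### " ++ sid) status sec = pvProc sid status sec := by
  cases sec with
  | nil => rfl
  | cons l ls =>
    show (if pvIsMatch sid l then ((l :: ls).foldl (pvStepR status) ([], false)).1
          else l :: ls) = pvProc sid status (l :: ls)
    simp only [pvProc, pvSecMatch]
    by_cases h : pvIsMatch sid l = true
    · rw [if_pos h, if_pos h, pvFoldR_eq, List.nil_append]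
    · rw [if_neg h, if_neg h]

-- a line matching '### {step_id}' is a header line
lemma pvMatch_hdr {sid l : String} (h : pvIsMatch sid l = true) : pvIsHdr l = true := by
  simp only [pvIsMatch, pvIsHdr, PySem.Str.startswith_eq, PySem.Chars.startswith_iff] at h ⊢
  simp only [String.toList_append] at h
  exact List.IsPrefix.trans (List.prefix_append _ _) h

-- a header line is never a status line (the prefixes disagree at the first character)
lemma pvHdr_not_st {l : String} (h : pvIsHdr l = true) : pvIsSt l = false := by
  simp only [pvIsHdr, PySem.Str.startswith_eq, PySem.Chars.startswith_iff] at h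
  simp only [pvIsSt, PySem.Str.startswith_eq, ← Bool.not_eq_true,
    PySem.Chars.startswith_iff]
  intro h2
  obtain ⟨t1, e1⟩ := h
  obtain ⟨t2, e2⟩ := h2
  have := e1.trans e2.symm
  simp at this

lemma pvRepl_append (status : String) (xs ys : List String) (r : Bool) :
    pvRepl status (xs ++ ys) r = pvRepl status xs r ++ pvRepl status ys (r || xs.any pvIsSt) := by
  induction xs generalizing r with
  | nil => simp only [List.nil_append, pvRepl, List.any_nil, Bool.or_false]
  | cons x xs ih =>
    simp only [List.cons_append, pvRepl, List.any_cons]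
    cases hx : pvIsSt x <;> cases r <;>
      simp only [Bool.not_false, Bool.not_true, Bool.true_and, Bool.false_and,
        Bool.and_false, Bool.and_true, Bool.false_eq_true, eq_self_iff_true, if_false, if_true, ih, Bool.false_or, Bool.true_or,
        Bool.or_false, Bool.or_true, List.cons_append]

-- the A-scan flag that corresponds to a pending section `cur`
def pvFlagOf (sid : String) (cur : List String) : Bool :=
  pvSecMatch sid cur && !(cur.any pvIsSt)

-- KEY: B's remaining contribution from pending section `cur` = A's scan from flag pvFlagOf cur
lemma pvKey (sid status : String) (ls : List String) (cur : List String) :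
    (pvGroups ls cur).flatMap (pvProc sid status)
      = pvProc sid status cur ++ pvRunA sid status ls (pvFlagOf sid cur) := by
  induction ls generalizing cur with
  | nil => simp only [pvGroups, List.flatMap_cons, List.flatMap_nil, pvRunA, List.append_nil]
  | cons l ls ih =>
    simp only [pvGroups, pvRunA]
    by_cases hh : pvIsHdr l = true
    · -- a header closes the pending section and opens [l]
      have hst : pvIsSt l = false := pvHdr_not_st hh
      rw [if_pos hh]
      simp only [List.flatMap_cons, ih [l]]
      have hproc : pvProc sid status [l] = [l] := by
        simp only [pvProc, pvSecMatch]
        by_cases hm : pvIsMatch sid l = true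
        · rw [if_pos hm]
          simp only [pvRepl, hst, Bool.not_false, Bool.true_and, Bool.false_eq_true,
            if_false]
        · rw [if_neg hm]
      cases hm : pvIsMatch sid l
      · have hfl : pvFlagOf sid [l] = false := by
          simp only [pvFlagOf, pvSecMatch, hm, Bool.false_and]
        rw [hfl, hproc]
        simp only [hh, Bool.and_true, Bool.and_false, Bool.false_eq_true, eq_self_iff_true, if_false, if_true,
          List.append_assoc, List.singleton_append]
        cases hb : pvFlagOf sid cur <;>
          simp only [Bool.false_eq_true, eq_self_iff_true, if_false, if_true, Bool.false_and, Bool.true_and, hst, Bool.and_false]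
      · have hfl : pvFlagOf sid [l] = true := by
          simp only [pvFlagOf, pvSecMatch, hm, Bool.true_and, List.any_cons, List.any_nil,
            hst, Bool.or_false, Bool.not_false]
        rw [hfl, hproc]
        simp only [Bool.false_eq_true, eq_self_iff_true, if_false, if_true, List.append_assoc, List.singleton_append]
    · -- a non-header line extends the pending section
      have hhb : pvIsHdr l = false := by
        cases h : pvIsHdr l
        · rfl
        · exact absurd h hh
      have hm : pvIsMatch sid l = false := by
        cases h : pvIsMatch sid l
        · rfl
        · exact absurd (pvMatch_hdr h) hh
      rw [if_neg hh, ih (cur ++ [l])]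
      have hsm : pvSecMatch sid (cur ++ [l]) = pvSecMatch sid cur := by
        cases cur
        · simp only [List.nil_append, pvSecMatch, hm]
        · rfl
      simp only [hm, Bool.false_eq_true, Bool.false_eq_true, eq_self_iff_true, if_false, if_true, hhb, Bool.and_false]
      cases hc : pvSecMatch sid cur
      · -- non-matching (or preamble) section: everything is copied
        have hf : pvFlagOf sid cur = false := by
          simp only [pvFlagOf, hc, Bool.false_and]
        have hf2 : pvFlagOf sid (cur ++ [l]) = false := by
          simp only [pvFlagOf, hsm, hc, Bool.false_and]
        have hpl : pvProc sid status (cur ++ [l]) = cur ++ [l] := by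
          simp only [pvProc, hsm, hc, Bool.false_eq_true, Bool.false_eq_true, eq_self_iff_true, if_false, if_true]
        have hpc : pvProc sid status cur = cur := by
          simp only [pvProc, hc, Bool.false_eq_true, Bool.false_eq_true, eq_self_iff_true, if_false, if_true]
        rw [hf, hf2, hpl, hpc]
        simp only [Bool.false_and, Bool.false_eq_true, Bool.false_eq_true, eq_self_iff_true, if_false, if_true,
          List.append_assoc, List.singleton_append]
      · -- matching section: the replacement loop threads through
        have hp : pvProc sid status (cur ++ [l]) = pvRepl status cur false
            ++ pvRepl status [l] (cur.any pvIsSt) := by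
          simp only [pvProc, hsm, hc, Bool.false_eq_true, eq_self_iff_true, if_false, if_true, pvRepl_append, Bool.false_or]
        have hpc : pvProc sid status cur = pvRepl status cur false := by
          simp only [pvProc, hc, Bool.false_eq_true, eq_self_iff_true, if_false, if_true]
        rw [hp, hpc, List.append_assoc]
        congr 1
        cases ha : cur.any pvIsSt
        · -- no status line seen yet in this section: the flag is up
          have hf : pvFlagOf sid cur = true := by
            simp only [pvFlagOf, hc, ha, Bool.not_false, Bool.true_and]
          have hf2 : pvFlagOf sid (cur ++ [l]) = (!pvIsSt l) := by
            simp only [pvFlagOf, hsm, hc, List.any_append, ha, List.any_cons, List.any_nil,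
              Bool.or_false, Bool.false_or, Bool.true_and]
          rw [hf, hf2]
          cases hs : pvIsSt l <;>
            simp only [pvRepl, hs, Bool.not_false, Bool.not_true, Bool.true_and,
              Bool.false_eq_true, eq_self_iff_true, if_false, if_true, List.singleton_append]
        · -- the section's status line is already replaced: the flag is down
          have hf : pvFlagOf sid cur = false := by
            simp only [pvFlagOf, hc, ha, Bool.not_true, Bool.and_false]
          have hf2 : pvFlagOf sid (cur ++ [l]) = false := by
            simp only [pvFlagOf, hsm, hc, List.any_append, ha, Bool.true_or,
              Bool.not_true, Bool.and_false]
          rw [hf, hf2]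
          simp only [pvRepl, Bool.not_true, Bool.false_and, Bool.false_eq_true,
            Bool.false_eq_true, eq_self_iff_true, if_false, if_true, List.singleton_append]

-- both ports produce the same list of output lines
lemma pvOut_eq (sid status : String) (lines : List String) :
    (pvSplitSections lines).foldl
        (fun acc sec => acc ++ pvFixSection ("### " ++ sid) status sec) []
      = (lines.foldl (pvStepA sid status) ([], false)).1 := by
  rw [PySem.List.foldl_append_eq_flatMap (pvFixSection ("### " ++ sid) status) _ [],
    show pvSplitSections lines = pvGroups lines [] by
      simpa [pvSplitSections] using pvFoldG_eq lines [] [],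
    List.flatMap_congr (g := pvProc sid status) (fun sec _ => pvFix_eq_proc sid status sec),
    pvKey, pvFoldA_eq]
  rfl

-- ===== VERDICT (by name: the statement is the Claim_ definition above) =====
theorem update_plan_md_step_spec : Claim_equal_update_plan_md_step := by
  intro content step_id status notes _
  show update_plan_md_step content step_id status notes
      = update_plan_md_step_alt content step_id status notes
  unfold update_plan_md_step update_plan_md_step_alt
  rw [pvOut_eq]
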